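-- pv_equiv track=rewrite | github.com/sh1d0re/wordle-solver | main.py | checkIfValidResult
-- ===== SOURCE A (Python) =====
-- def checkIfValidResult(result: str):
--     resultSet = set(list(result))
--     for validInput in list("123"):
--         if validInput in resultSet:
--             resultSet.remove(validInput)
--     validity = False
--     if len(resultSet) == 0:
--         validity = True
--     return(validity)
-- ===== SOURCE B (Python) =====
-- def checkIfValidResult(result: str):
--     return result.strip("123") == ""
-- ===== Notes on version B (the rewrite author's own statement) =====
-- stated objective: simpler
-- what changed: Replaces A's build-a-set-of-characters-then-remove-the-valid-ones-and-test-emptiness strategy with a single str.strip call over the valid alphabet: stripping the valid characters from both ends leaves the empty string exactly when every character is valid, so B is a one-line strip-and-compare with no set and no explicit loop.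
import Mathlib
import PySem

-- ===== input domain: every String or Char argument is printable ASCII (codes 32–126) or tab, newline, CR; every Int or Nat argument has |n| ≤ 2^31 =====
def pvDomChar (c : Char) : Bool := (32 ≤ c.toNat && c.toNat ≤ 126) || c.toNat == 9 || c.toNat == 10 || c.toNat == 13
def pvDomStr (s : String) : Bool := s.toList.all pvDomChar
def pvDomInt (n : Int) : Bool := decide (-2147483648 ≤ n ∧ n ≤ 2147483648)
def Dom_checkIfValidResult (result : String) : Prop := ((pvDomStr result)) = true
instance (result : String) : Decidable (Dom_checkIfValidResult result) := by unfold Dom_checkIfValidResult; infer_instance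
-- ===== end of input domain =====

-- B replaces A's set-build-and-remove strategy with a single strip('123')-and-compare-to-empty (objective: simpler).

-- ===== PORT A =====
-- resultSet = set(list(result)); for validInput in list("123"): if in set, remove; validity = (len == 0)
def checkIfValidResult (result : String) : Bool :=
  let resultSet : PySem.Set Char := PySem.Set.ofList result.toList
  let resultSet :=
    (['1','2','3'] : List Char).foldl
      (fun s validInput =>
        if PySem.Set.contains s validInput then (PySem.Set.remove? s validInput).getD s else s)
      resultSet
  let validity := false
  let validity := if PySem.Set.len resultSet = 0 then true else validity
  validity

-- ===== PORT B =====
-- return result.strip("123") == ""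
def checkIfValidResult_alt (result : String) : Bool :=
  PySem.Str.stripChars result "123" == ""

-- ===== PRECONDITION & SPEC =====
def Spec_checkIfValidResult (result : String) (out : Bool) : Prop := out = checkIfValidResult_alt result
instance (result : String) (out : Bool) : Decidable (Spec_checkIfValidResult result out) := by unfold Spec_checkIfValidResult; infer_instance

-- ===== CLAIM (what is proved, stated in full; the proofs are below) =====
def Claim_equal_checkIfValidResult : Prop := ∀ (result : String), Dom_checkIfValidResult result → Spec_checkIfValidResult result (checkIfValidResult result)

-- ===== LEMMAS AND PROOFS =====

-- One loop step of A equals Set.discard, whether or not the element is present.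
theorem pv_step_eq_discard (s : PySem.Set Char) (c : Char) :
    (if PySem.Set.contains s c then (PySem.Set.remove? s c).getD s else s) = PySem.Set.discard s c := by
  by_cases h : PySem.Set.contains s c = true
  · rw [if_pos h, PySem.Set.remove?_of_mem ((PySem.Set.contains_iff _ _).mp h)]
    rfl
  · rw [if_neg h]
    unfold PySem.Set.discard
    rw [List.filter_eq_self.mpr]
    intro a ha
    simp only [Bool.not_eq_eq_eq_not, Bool.not_true, beq_eq_false_iff_ne]
    intro hac
    exact h ((PySem.Set.contains_iff _ _).mpr (hac ▸ ha))

theorem pv_mem_final (l : List Char) (y : Char) :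
    y ∈ (PySem.Set.discard (PySem.Set.discard (PySem.Set.discard (PySem.Set.ofList l) '1') '2') '3')
      ↔ y ∈ l ∧ y ≠ '1' ∧ y ≠ '2' ∧ y ≠ '3' := by
  simp [PySem.Set.mem_discard, PySem.Set.mem_ofList]
  tauto

-- A's result equals the all-characters-valid predicate.
theorem pv_A_eq_all (result : String) :
    checkIfValidResult result = result.toList.all (fun c => (['1','2','3'] : List Char).contains c) := by
  unfold checkIfValidResult
  simp only [List.foldl, pv_step_eq_discard]
  set l := result.toList with hl
  set fin := (PySem.Set.discard (PySem.Set.discard (PySem.Set.discard (PySem.Set.ofList l) '1') '2') '3') with hfin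
  show (if PySem.Set.len fin = 0 then true else false) = l.all (fun c => (['1','2','3'] : List Char).contains c)
  have hmem : ∀ y, y ∈ fin ↔ y ∈ l ∧ y ≠ '1' ∧ y ≠ '2' ∧ y ≠ '3' := fun y => pv_mem_final l y
  by_cases h : fin = []
  · have hlen : PySem.Set.len fin = 0 := by rw [h]; rfl
    rw [if_pos hlen]
    symm
    rw [List.all_eq_true]
    intro c hc
    by_contra hbad
    have : c ∈ fin := (hmem c).mpr ⟨hc, by
      simp only [List.contains_eq_mem, decide_eq_true_eq, List.mem_cons, List.not_mem_nil, or_false, not_or] at hbad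
      exact ⟨hbad.1, hbad.2.1, hbad.2.2⟩⟩
    rw [h] at this; exact absurd this (List.not_mem_nil)
  · have hlen : PySem.Set.len fin ≠ 0 := by
      unfold PySem.Set.len
      simp only [ne_eq, Nat.cast_eq_zero, List.length_eq_zero_iff]
      exact h
    rw [if_neg hlen]
    symm
    rw [Bool.eq_false_iff, Ne, List.all_eq_true]
    intro hall
    obtain ⟨y, hy⟩ := List.exists_mem_of_ne_nil fin h
    obtain ⟨hyl, h1, h2, h3⟩ := (hmem y).mp hy
    have := hall y hyl
    simp only [List.contains_eq_mem, decide_eq_true_eq, List.mem_cons, List.not_mem_nil, or_false] at this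
    rcases this with h | h | h
    · exact h1 h
    · exact h2 h
    · exact h3 h

-- Stripping a set of characters leaves the empty list iff every character was in that set.
theorem pv_stripChars_eq_nil_iff (l chars : List Char) :
    PySem.Chars.stripChars l chars = [] ↔ ∀ c ∈ l, chars.contains c = true := by
  unfold PySem.Chars.stripChars
  constructor
  · intro h c hc
    rw [List.reverse_eq_nil_iff, List.dropWhile_eq_nil_iff] at h
    by_cases hdrop : c ∈ List.dropWhile (fun c => chars.contains c) l
    · exact h c (List.mem_reverse.mpr hdrop)
    · -- c was dropped by the first dropWhile, so it satisfies the predicate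
      have := List.dropWhile_sublist (l := l) (p := fun c => chars.contains c)
      -- elements of l not in dropWhile are in the dropped prefix, which all satisfy p
      have hsplit : l = l.takeWhile (fun c => chars.contains c) ++ l.dropWhile (fun c => chars.contains c) :=
        (List.takeWhile_append_dropWhile).symm
      rw [hsplit] at hc
      rcases List.mem_append.mp hc with htake | hd
      · exact List.mem_takeWhile_imp htake
      · exact absurd hd hdrop
  · intro h
    have h1 : List.dropWhile (fun c => chars.contains c) l = [] :=
      List.dropWhile_eq_nil_iff.mpr h
    show (List.dropWhile _ (List.dropWhile _ l).reverse).reverse = []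
    rw [h1]
    rfl

-- B's result equals the all-characters-valid predicate.
theorem pv_B_eq_all (result : String) :
    checkIfValidResult_alt result = result.toList.all (fun c => (['1','2','3'] : List Char).contains c) := by
  unfold checkIfValidResult_alt
  by_cases h : ∀ c ∈ result.toList, (['1','2','3'] : List Char).contains c = true
  · have hs : PySem.Chars.stripChars result.toList ("123" : String).toList = [] := by
      rw [pv_stripChars_eq_nil_iff]
      exact h
    have hstr : PySem.Str.stripChars result "123" = "" := by
      have := PySem.Str.toList_stripChars result "123"
      rw [hs] at this
      exact String.toList_inj.mp (by simpa using this)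
    rw [hstr]
    symm
    exact List.all_eq_true.mpr h
  · have hs : PySem.Chars.stripChars result.toList ("123" : String).toList ≠ [] := by
      intro hnil
      exact h ((pv_stripChars_eq_nil_iff _ _).mp hnil)
    have hstr : PySem.Str.stripChars result "123" ≠ "" := by
      intro hnil
      apply hs
      rw [← PySem.Str.toList_stripChars, hnil]
      rfl
    have h1 : (PySem.Str.stripChars result "123" == "") = false := by
      simpa [beq_eq_false_iff_ne] using hstr
    rw [h1]
    symm
    simpa [List.all_eq_true] using h

-- ===== VERDICT (by name: the statement is the Claim_ definition above) =====
theorem checkIfValidResult_spec : Claim_equal_checkIfValidResult := by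
  intro result _
  unfold Spec_checkIfValidResult
  rw [pv_A_eq_all, pv_B_eq_all]
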